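-- pv_equiv track=rewrite | github.com/Harold-ES/PasswordGeneratorAndAnalyzer | password_anlyzer.py | detectar_secuencias
-- ===== SOURCE A (Python) =====
-- secuencias_teclado = ["qwerty", "asdfgh", "zxcvbn"]
--
-- def detectar_secuencias(password, min_secuencia=4):
--     for secuencia in secuencias_teclado:
--         if secuencia in password.lower():
--             return " Contiene una secuencia de teclado predecible."
--
--     for i in range(len(password) - min_secuencia + 1):
--         subcadena = password[i:i + min_secuencia]
--         if subcadena.isdigit():
--             numeros = list(map(int, subcadena))
--             if numeros == list(range(numeros[0], numeros[0] + min_secuencia)) or \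
--                numeros == list(range(numeros[0], numeros[0] - min_secuencia, -1)):
--                 return " Contiene una secuencia numérica predecible."
--     return None
-- ===== SOURCE B (Python) =====
-- secuencias_teclado = ["qwerty", "asdfgh", "zxcvbn"]
--
-- def detectar_secuencias(password, min_secuencia=4):
--     lowered = password.lower()
--     if any(seq in lowered for seq in secuencias_teclado):
--         return " Contiene una secuencia de teclado predecible."
--     if min_secuencia >= 1:
--         digits = "0123456789"
--         asc = [digits[d:d + min_secuencia] for d in range(10 - min_secuencia + 1)]
--         patterns = asc + [p[::-1] for p in asc]
--         if any(p in password for p in patterns):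
--             return " Contiene una secuencia numérica predecible."
--     return None
-- ===== Notes on version B (the rewrite author's own statement) =====
-- stated objective: faster
-- what changed: The per-window arithmetic check (slice each window, map its digits to ints, compare against two freshly built range lists) is replaced by a precomputed table of predictable digit runs (slices of '0123456789' and their reverses) tested by plain substring membership, mirroring the keyboard check's style.
import Mathlib
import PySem

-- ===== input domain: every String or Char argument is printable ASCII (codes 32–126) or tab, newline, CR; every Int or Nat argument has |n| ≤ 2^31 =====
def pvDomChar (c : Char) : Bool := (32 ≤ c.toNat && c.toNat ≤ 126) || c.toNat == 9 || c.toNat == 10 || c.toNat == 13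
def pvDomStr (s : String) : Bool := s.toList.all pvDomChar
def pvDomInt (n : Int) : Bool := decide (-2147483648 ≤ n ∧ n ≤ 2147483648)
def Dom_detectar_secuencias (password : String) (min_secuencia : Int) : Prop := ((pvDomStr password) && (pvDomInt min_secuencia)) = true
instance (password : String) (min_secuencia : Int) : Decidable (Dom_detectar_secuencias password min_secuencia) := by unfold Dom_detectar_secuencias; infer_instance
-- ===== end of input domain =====

-- B replaces A's per-window arithmetic digit-sequence check by a precomputed table of
-- digit runs (slices of "0123456789" and their reverses) tested by substring membership (same result; measurably faster: constant table + substring scan).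


-- ===== PORT A =====
def secuencias_teclado : List String := ["qwerty", "asdfgh", "zxcvbn"]

-- int(c): guarded by .isdigit() in A, so c is an ASCII digit on the stated domain, where int(c) = c.toNat - 48 exactly
def pvIntDigit (c : Char) : Int := (c.toNat : Int) - 48

-- the body of A's numeric for-loop, on the window subcadena = password[i:i+min_secuencia]
def pvCheckWin (min_secuencia : Int) (w : List Char) : Bool :=
  PySem.Chars.strIsdigit w &&
    (let numeros := w.map pvIntDigit
     let n0 := (PySem.List.pyGet? numeros 0).getD 0
     (numeros == PySem.List.pyRange n0 (n0 + min_secuencia) 1) ||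
     (numeros == PySem.List.pyRange n0 (n0 - min_secuencia) (-1)))

def detectar_secuencias (password : String) (min_secuencia : Int) : Option String :=
  if secuencias_teclado.any (fun s => PySem.Str.isIn s (PySem.Str.lower password)) then
    some " Contiene una secuencia de teclado predecible."
  else if (PySem.List.pyRange 0 ((PySem.Str.len password : Int) - min_secuencia + 1) 1).any
      (fun i => pvCheckWin min_secuencia
        (PySem.List.slice password.toList (some i) (some (i + min_secuencia)))) then
    some " Contiene una secuencia numérica predecible."
  else none

-- ===== PORT B =====
def detectar_secuencias_alt (password : String) (min_secuencia : Int) : Option String :=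
  let lowered := PySem.Str.lower password
  if secuencias_teclado.any (fun s => PySem.Str.isIn s lowered) then
    some " Contiene una secuencia de teclado predecible."
  else if 1 ≤ min_secuencia then
    let digits := "0123456789".toList
    let asc := (PySem.List.pyRange 0 (10 - min_secuencia + 1) 1).map
      (fun d => PySem.List.slice digits (some d) (some (d + min_secuencia)))
    let patterns := asc ++ asc.map List.reverse
    if patterns.any (fun p => PySem.Chars.isIn p password.toList) then
      some " Contiene una secuencia numérica predecible."
    else none
  else none

-- ===== PRECONDITION & SPEC =====
def Spec_detectar_secuencias (password : String) (min_secuencia : Int) (out : Option String) : Prop := out = detectar_secuencias_alt password min_secuencia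
instance (password : String) (min_secuencia : Int) (out : Option String) : Decidable (Spec_detectar_secuencias password min_secuencia out) := by unfold Spec_detectar_secuencias; infer_instance

-- ===== CLAIM (what is proved, stated in full; the proofs are below) =====
def Claim_equal_detectar_secuencias : Prop := ∀ (password : String) (min_secuencia : Int), Dom_detectar_secuencias password min_secuencia → Spec_detectar_secuencias password min_secuencia (detectar_secuencias password min_secuencia)

-- ===== LEMMAS AND PROOFS =====

-- one ascending digit run, as B slices it out of "0123456789"
def ascRun (m d : Int) : List Char :=
  PySem.List.slice "0123456789".toList (some d) (some (d + m))

-- B's pattern table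
def pattList (m : Int) : List (List Char) :=
  ((PySem.List.pyRange 0 (10 - m + 1) 1).map (fun d => ascRun m d)) ++
  ((PySem.List.pyRange 0 (10 - m + 1) 1).map (fun d => ascRun m d)).map List.reverse

theorem isdigit_toNat {c : Char} (h : PySem.Chars.isdigit c = true) :
    48 ≤ c.toNat ∧ c.toNat ≤ 57 := by
  unfold PySem.Chars.isdigit at h
  rw [Bool.and_eq_true, decide_eq_true_iff, decide_eq_true_iff, Char.le_def, Char.le_def,
    UInt32.le_iff_toNat_le, UInt32.le_iff_toNat_le] at h
  exact h

theorem pvIntDigit_inj : ∀ (u v : List Char),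
    u.all PySem.Chars.isdigit = true → v.all PySem.Chars.isdigit = true →
    u.map pvIntDigit = v.map pvIntDigit → u = v := by
  intro u
  induction u with
  | nil =>
    intro v _ _ h
    cases v with
    | nil => rfl
    | cons c' t' => simp at h
  | cons c t ih =>
    intro v hu hv h
    cases v with
    | nil => simp at h
    | cons c' t' =>
      simp only [List.all_cons, Bool.and_eq_true] at hu hv
      simp only [List.map_cons, List.cons.injEq] at h
      have hc : c = c' := by
        apply Char.ext
        apply UInt32.toNat_inj.mp
        have h48 := isdigit_toNat hu.1
        have h48' := isdigit_toNat hv.1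
        have := h.1
        simp only [pvIntDigit] at this
        have : (c.toNat : Int) = (c'.toNat : Int) := by omega
        have : c.toNat = c'.toNat := by exact_mod_cast this
        exact this
      exact hc ▸ (ih t' hu.2 hv.2 h.2) ▸ rfl

-- finite facts about the runs (1 ≤ m ≤ 10, 0 ≤ d ≤ 10 - m: finitely many cases)
theorem ascRun_facts (m d : Int) (h1 : 1 ≤ m) (h2 : m ≤ 10) (h3 : 0 ≤ d) (h4 : d + m ≤ 10) :
    (ascRun m d).map pvIntDigit = PySem.List.pyRange d (d + m) 1 ∧
    (ascRun m d).all PySem.Chars.isdigit = true ∧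
    (ascRun m d).length = m.toNat := by
  have h4' : d ≤ 10 - m := by omega
  interval_cases m <;> interval_cases d <;> decide

theorem pvCheckWin_run (m d : Int) (h1 : 1 ≤ m) (h3 : 0 ≤ d) (h4 : d < 10 - m + 1) :
    pvCheckWin m (ascRun m d) = true ∧ pvCheckWin m (ascRun m d).reverse = true := by
  have h2 : m ≤ 10 := by omega
  have h4' : d ≤ 10 - m := by omega
  interval_cases m <;> interval_cases d <;> decide

theorem pvCheckWin_neg (m : Int) (hm : m ≤ 0) (w : List Char) : pvCheckWin m w = false := by
  cases w with
  | nil => rfl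
  | cons c t =>
    simp only [pvCheckWin]
    generalize ((PySem.List.pyGet? ((c :: t).map pvIntDigit) 0).getD 0) = n0
    rw [PySem.List.pyRange_one_eq_nil (by omega : n0 + m ≤ n0),
      PySem.List.pyRange_neg_one_eq_nil (by omega : n0 ≤ n0 - m)]
    have hb : ((c :: t).map pvIntDigit == ([] : List Int)) = false := rfl
    rw [hb, Bool.or_self, Bool.and_false]

theorem pattList_mem_bounds {m : Int} {p : List Char} (_hm : 1 ≤ m) (hp : p ∈ pattList m) :
    ∃ d, 0 ≤ d ∧ d + m ≤ 10 ∧ (p = ascRun m d ∨ p = (ascRun m d).reverse) := by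
  unfold pattList at hp
  rcases List.mem_append.mp hp with h | h
  · rcases List.mem_map.mp h with ⟨d, hd, rfl⟩
    rw [PySem.List.mem_pyRange_one] at hd
    exact ⟨d, hd.1, by omega, Or.inl rfl⟩
  · rcases List.mem_map.mp h with ⟨q, hq, rfl⟩
    rcases List.mem_map.mp hq with ⟨d, hd, rfl⟩
    rw [PySem.List.mem_pyRange_one] at hd
    exact ⟨d, hd.1, by omega, Or.inr rfl⟩

theorem pattList_length {m : Int} {p : List Char} (hm : 1 ≤ m) (hp : p ∈ pattList m) :
    p.length = m.toNat := by
  obtain ⟨d, h0, h10, hcase⟩ := pattList_mem_bounds hm hp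
  have hf := ascRun_facts m d hm (by omega) h0 h10
  rcases hcase with rfl | rfl
  · exact hf.2.2
  · rw [List.length_reverse]; exact hf.2.2

-- the window characterisation: A's per-window test accepts exactly B's patterns
theorem pvCheckWin_iff_mem (m : Int) (hm : 1 ≤ m) (w : List Char) :
    pvCheckWin m w = true ↔ w ∈ pattList m := by
  constructor
  · intro h
    simp only [pvCheckWin, Bool.and_eq_true, Bool.or_eq_true, beq_iff_eq] at h
    obtain ⟨hd, hor⟩ := h
    have hd' : w.isEmpty = false ∧ w.all PySem.Chars.isdigit = true := by
      unfold PySem.Chars.strIsdigit at hd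
      rw [Bool.and_eq_true, Bool.not_eq_true'] at hd
      exact hd
    obtain ⟨c, t, rfl⟩ : ∃ c t, w = c :: t := by
      cases w with
      | nil => simp at hd'
      | cons c t => exact ⟨c, t, rfl⟩
    have hall := hd'.2
    have hbound : ∀ x ∈ (c :: t).map pvIntDigit, 0 ≤ x ∧ x ≤ 9 := by
      intro x hx
      rcases List.mem_map.mp hx with ⟨c', hc', rfl⟩
      have := isdigit_toNat ((List.all_eq_true.mp hall) c' hc')
      simp only [pvIntDigit]
      omega
    have hn0 : (PySem.List.pyGet? ((c :: t).map pvIntDigit) 0).getD 0 = pvIntDigit c := by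
      simp [PySem.List.pyGet?, PySem.List.pyIdx?]
    rw [hn0] at hor
    rcases hor with h2 | h2
    · have hmem1 : pvIntDigit c ∈ PySem.List.pyRange (pvIntDigit c) (pvIntDigit c + m) 1 :=
        PySem.List.mem_pyRange_one.mpr ⟨le_refl _, by omega⟩
      have hmem2 : pvIntDigit c + m - 1 ∈ PySem.List.pyRange (pvIntDigit c) (pvIntDigit c + m) 1 :=
        PySem.List.mem_pyRange_one.mpr ⟨by omega, by omega⟩
      rw [← h2] at hmem1 hmem2
      have hb1 := hbound _ hmem1
      have hb2 := hbound _ hmem2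
      have hf := ascRun_facts m (pvIntDigit c) hm (by omega) (by omega) (by omega)
      have hw : c :: t = ascRun m (pvIntDigit c) :=
        pvIntDigit_inj _ _ hall hf.2.1 (h2.trans hf.1.symm)
      rw [hw]
      unfold pattList
      exact List.mem_append.mpr (Or.inl (List.mem_map.mpr
        ⟨pvIntDigit c, PySem.List.mem_pyRange_one.mpr ⟨by omega, by omega⟩, rfl⟩))
    · rw [PySem.List.pyRange_neg_one_eq_reverse] at h2
      have h2' : ((c :: t).reverse).map pvIntDigit =
          PySem.List.pyRange (pvIntDigit c - m + 1) (pvIntDigit c + 1) 1 := by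
        rw [List.map_reverse, h2, List.reverse_reverse]
      have hbr : ∀ x ∈ ((c :: t).reverse).map pvIntDigit, 0 ≤ x ∧ x ≤ 9 := by
        intro x hx
        rcases List.mem_map.mp hx with ⟨c', hc', rfl⟩
        have := isdigit_toNat ((List.all_eq_true.mp hall) c' (List.mem_reverse.mp hc'))
        simp only [pvIntDigit]
        omega
      have hmem1 : pvIntDigit c - m + 1 ∈
          PySem.List.pyRange (pvIntDigit c - m + 1) (pvIntDigit c + 1) 1 :=
        PySem.List.mem_pyRange_one.mpr ⟨le_refl _, by omega⟩
      have hmem2 : pvIntDigit c ∈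
          PySem.List.pyRange (pvIntDigit c - m + 1) (pvIntDigit c + 1) 1 :=
        PySem.List.mem_pyRange_one.mpr ⟨by omega, by omega⟩
      rw [← h2'] at hmem1 hmem2
      have hb1 := hbr _ hmem1
      have hb2 := hbr _ hmem2
      have hallr : ((c :: t).reverse).all PySem.Chars.isdigit = true := by
        rw [List.all_reverse]
        exact hall
      have hf := ascRun_facts m (pvIntDigit c - m + 1) hm (by omega) (by omega) (by omega)
      have hf1 := hf.1
      rw [show pvIntDigit c - m + 1 + m = pvIntDigit c + 1 by ring] at hf1
      have hw : (c :: t).reverse = ascRun m (pvIntDigit c - m + 1) :=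
        pvIntDigit_inj _ _ hallr hf.2.1 (h2'.trans hf1.symm)
      have hwr : c :: t = (ascRun m (pvIntDigit c - m + 1)).reverse := by
        rw [← hw, List.reverse_reverse]
      rw [hwr]
      unfold pattList
      exact List.mem_append.mpr (Or.inr (List.mem_map.mpr
        ⟨ascRun m (pvIntDigit c - m + 1), List.mem_map.mpr
          ⟨pvIntDigit c - m + 1, PySem.List.mem_pyRange_one.mpr ⟨by omega, by omega⟩, rfl⟩, rfl⟩))
  · intro hp
    obtain ⟨d, h0, h10, hcase⟩ := pattList_mem_bounds hm hp
    have hr := pvCheckWin_run m d hm h0 (by omega)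
    rcases hcase with rfl | rfl
    · exact hr.1
    · exact hr.2

-- the loop ↔ membership equivalence
theorem numeric_loop_eq (cs : List Char) (m : Int) (hm : 1 ≤ m) :
    (PySem.List.pyRange 0 ((cs.length : Int) - m + 1) 1).any
      (fun i => pvCheckWin m (PySem.List.slice cs (some i) (some (i + m)))) =
    (pattList m).any (fun p => PySem.Chars.isIn p cs) := by
  apply Bool.eq_iff_iff.mpr
  constructor
  · intro h
    rcases List.any_eq_true.mp h with ⟨i, hi, hchk⟩
    rw [PySem.List.mem_pyRange_one] at hi
    have hi0 : 0 ≤ i := hi.1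
    have hislice : PySem.List.slice cs (some i) (some (i + m)) = (cs.drop i.toNat).take m.toNat := by
      rw [show i = ((i.toNat : Nat) : Int) from (Int.toNat_of_nonneg hi0).symm,
          show m = ((m.toNat : Nat) : Int) from (Int.toNat_of_nonneg (by omega)).symm]
      exact PySem.List.slice_natCast_add cs i.toNat m.toNat
    rw [hislice] at hchk
    have hmem := (pvCheckWin_iff_mem m hm _).mp hchk
    refine List.any_eq_true.mpr ⟨_, hmem, ?_⟩
    exact (PySem.Chars.exists_prefix_drop_iff_isIn _ _).mp ⟨i.toNat, List.take_prefix _ _⟩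
  · intro h
    rcases List.any_eq_true.mp h with ⟨p, hp, hin⟩
    have hlen := pattList_length hm hp
    obtain ⟨j, hpre⟩ := (PySem.Chars.exists_prefix_drop_iff_isIn _ _).mpr hin
    have hjlen : p.length ≤ cs.length - j := by simpa using hpre.length_le
    have hmnat : (m.toNat : Int) = m := Int.toNat_of_nonneg (by omega)
    have hmn : 1 ≤ m.toNat := by omega
    have hj : j + m.toNat ≤ cs.length := by omega
    refine List.any_eq_true.mpr ⟨(j : Int), PySem.List.mem_pyRange_one.mpr ⟨by omega, by omega⟩, ?_⟩
    have hislice : PySem.List.slice cs (some (j : Int)) (some ((j : Int) + m)) =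
        (cs.drop j).take m.toNat := by
      rw [show m = ((m.toNat : Nat) : Int) from hmnat.symm]
      exact PySem.List.slice_natCast_add cs j m.toNat
    have hwin : (cs.drop j).take m.toNat = p := by
      have hq := List.prefix_iff_eq_take.mp hpre
      rw [hlen] at hq
      exact hq.symm
    rw [hislice, hwin]
    exact (pvCheckWin_iff_mem m hm p).mpr hp

-- ===== VERDICT (by name: the statement is the Claim_ definition above) =====
theorem detectar_secuencias_spec : Claim_equal_detectar_secuencias := by
  intro password m _
  unfold Spec_detectar_secuencias
  simp only [detectar_secuencias, detectar_secuencias_alt]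
  by_cases hk : (secuencias_teclado.any fun s => PySem.Str.isIn s (PySem.Str.lower password)) = true
  · rw [if_pos hk, if_pos hk]
  · rw [if_neg hk, if_neg hk]
    by_cases hm : 1 ≤ m
    · rw [if_pos hm, PySem.Str.len_eq, numeric_loop_eq password.toList m hm]
      rfl
    · rw [if_neg hm]
      have hfalse : (PySem.List.pyRange 0 ((PySem.Str.len password : Int) - m + 1) 1).any
          (fun i => pvCheckWin m (PySem.List.slice password.toList (some i) (some (i + m)))) = false :=
        List.any_eq_false.mpr (fun i _ => by simp [pvCheckWin_neg m (by omega)])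
      rw [hfalse]
      rfl
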